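-- pv_equiv track=rewrite | github.com/yymmt742/utf8f | src/gen_unicode_table.py | to_f90_arrayconstructer
-- ===== SOURCE A (Python) =====
-- def to_f90_arrayconstructer(vardef, var, table, nb: int = 5):
--     sep = ", &\n  "
--     return (
--         vardef
--         + var
--         + "[ &\n"
--         + "  "
--         + sep.join(
--             [
--                 ", ".join([t for t in table[i : i + nb]])
--                 for i in range(1, len(table), nb)
--             ]
--         )
--         + "]\n"
--     )
-- ===== SOURCE B (Python) =====
-- def to_f90_arrayconstructer(vardef, var, table, nb: int = 5):
--     out = vardef + var + "[ &\n" + "  "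
--     for j, t in enumerate(table[1:]):
--         if j == 0:
--             out += t
--         elif j % nb == 0:
--             out += ", &\n  " + t
--         else:
--             out += ", " + t
--     return out + "]\n"
-- ===== Notes on version B (the rewrite author's own statement) =====
-- stated objective: simpler
-- what changed: Replaces the nested comprehension (range-stepped slicing into chunks, inner comma-join, outer separator-join) by one flat pass over table[1:] with a running index that picks the separator (none / chunk-break / comma) for each element.
-- outside the precondition, e.g. on to_f90_arrayconstructer('d', 'v', ['x', 'a', 'b'], -1): A returns 'dv[ &\n  ]\n', B returns 'dv[ &\n  a, &\n  b]\n'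
import Mathlib
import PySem

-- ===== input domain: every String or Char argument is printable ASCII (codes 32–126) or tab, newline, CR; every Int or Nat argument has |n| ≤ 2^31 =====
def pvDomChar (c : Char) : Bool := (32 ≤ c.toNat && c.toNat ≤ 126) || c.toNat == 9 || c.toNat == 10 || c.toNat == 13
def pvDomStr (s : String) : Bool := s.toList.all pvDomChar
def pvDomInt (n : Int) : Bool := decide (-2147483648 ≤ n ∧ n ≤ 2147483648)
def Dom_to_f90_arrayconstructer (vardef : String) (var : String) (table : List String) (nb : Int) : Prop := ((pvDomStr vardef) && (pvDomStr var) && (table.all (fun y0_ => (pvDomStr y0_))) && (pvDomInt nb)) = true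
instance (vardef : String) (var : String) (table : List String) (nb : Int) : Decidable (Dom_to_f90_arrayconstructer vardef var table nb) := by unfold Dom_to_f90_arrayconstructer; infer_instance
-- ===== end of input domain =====

-- B builds the result in one flat pass over table[1:] with a running index choosing each
-- element's separator, instead of A's nested chunk-slicing and two-level joins (objective: simpler).

-- ===== PORT A =====
def to_f90_arrayconstructer (vardef : String) (var : String) (table : List String) (nb : Int) : String :=
  let sep := ", &\n  "
  vardef ++ var ++ "[ &\n" ++ "  " ++
    PySem.Str.join sep
      ((PySem.List.pyRange 1 (table.length : Int) nb).map
        (fun i => PySem.Str.join ", " ((PySem.List.slice table (some i) (some (i + nb))).map (fun t => t)))) ++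
    "]\n"

-- ===== PORT B =====
def to_f90_arrayconstructer_alt (vardef : String) (var : String) (table : List String) (nb : Int) : String :=
  let out := vardef ++ var ++ "[ &\n" ++ "  "
  let body := (PySem.List.enumerate (PySem.List.slice table (some 1) none) 0).foldl
      (fun acc jt =>
        if jt.1 = 0 then acc ++ jt.2
        else if PySem.Int.mod jt.1 nb = 0 then acc ++ ", &\n  " ++ jt.2
        else acc ++ ", " ++ jt.2) out
  body ++ "]\n"

-- ===== PRECONDITION & SPEC =====
-- Pre_ excludes nb ≤ 0: nb = 0 makes A raise ValueError (range step 0, B raises too), and a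
-- negative chunk size is outside the natural domain of the function (A's empty body there
-- is an accident of negative range stepping).
def Pre_to_f90_arrayconstructer (vardef : String) (var : String) (table : List String) (nb : Int) : Prop := 1 ≤ nb
instance (vardef : String) (var : String) (table : List String) (nb : Int) : Decidable (Pre_to_f90_arrayconstructer vardef var table nb) := by unfold Pre_to_f90_arrayconstructer; infer_instance

def pvWitness_to_f90_arrayconstructer : String × String × List String × Int :=
  ("integer :: ", "tbl", ["hdr", "a", "b", "c"], 2)

def Spec_to_f90_arrayconstructer (vardef : String) (var : String) (table : List String) (nb : Int) (out : String) : Prop := out = to_f90_arrayconstructer_alt vardef var table nb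
instance (vardef : String) (var : String) (table : List String) (nb : Int) (out : String) : Decidable (Spec_to_f90_arrayconstructer vardef var table nb out) := by unfold Spec_to_f90_arrayconstructer; infer_instance

-- ===== CLAIM (what is proved, stated in full; the proofs are below) =====
def Claim_equal_to_f90_arrayconstructer : Prop := ∀ (vardef : String) (var : String) (table : List String) (nb : Int), Dom_to_f90_arrayconstructer vardef var table nb → Pre_to_f90_arrayconstructer vardef var table nb → Spec_to_f90_arrayconstructer vardef var table nb (to_f90_arrayconstructer vardef var table nb)

-- ===== LEMMAS AND PROOFS =====

-- string extensionality through toList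
theorem pvStrExt {a b : String} (h : a.toList = b.toList) : a = b := by
  simpa [String.ext_iff] using h

-- pyRange with a positive step: nil, cons and shift forms
theorem pvPyRange_pos_nil (a b s : Int) (hs : 0 < s) (h : b ≤ a) :
    PySem.List.pyRange a b s = [] := by
  rw [PySem.List.pyRange_of_pos a b hs]
  simp [show ¬ a < b by omega]

theorem pvPyRange_pos_cons (a b s : Int) (hs : 0 < s) (hab : a < b) :
    PySem.List.pyRange a b s = a :: PySem.List.pyRange (a + s) b s := by
  rw [PySem.List.pyRange_of_pos a b hs, PySem.List.pyRange_of_pos (a+s) b hs]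
  have h2 : (b - a + s - 1) / s = (b - a - 1) / s + 1 := by
    rw [show b - a + s - 1 = (b - a - 1) + 1 * s by ring,
        Int.add_mul_ediv_right _ _ (by omega : s ≠ 0)]
  have h4 : 0 ≤ (b - a - 1) / s := Int.ediv_nonneg (by omega) (by omega)
  have h5 : ((b - a + s - 1) / s).toNat = ((b - (a + s) + s - 1) / s).toNat + 1 := by
    rw [h2, show b - (a + s) + s - 1 = b - a - 1 by ring]; omega
  by_cases hb : a + s < b
  · simp only [if_pos hab, if_pos hb, h5, List.range_succ_eq_map, List.map_cons, List.map_map]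
    congr 1
    · simp
    · apply List.map_congr_left
      intro k _
      simp [Function.comp]
      ring
  · have h0 : ((b - (a + s) + s - 1) / s).toNat = 0 := by
      have : (b - a - 1) / s = 0 :=
        Int.ediv_eq_zero_of_lt (by omega) (by omega)
      rw [show b - (a + s) + s - 1 = b - a - 1 by ring]; omega
    simp only [if_pos hab, if_neg hb, h5, h0]
    simp

theorem pvPyRange_shift (a b c s : Int) (hs : 0 < s) :
    PySem.List.pyRange (a + c) (b + c) s = (PySem.List.pyRange a b s).map (· + c) := by
  rw [PySem.List.pyRange_of_pos _ _ hs, PySem.List.pyRange_of_pos _ _ hs]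
  rw [show b + c - (a + c) = b - a by ring]
  by_cases hab : a < b
  · simp only [if_pos hab, if_pos (show a + c < b + c by omega), List.map_map]
    apply List.map_congr_left
    intro k _
    simp [Function.comp]
    ring
  · simp [if_neg hab, show ¬ a + c < b + c by omega]

-- reference chunk decomposition (proof-side only): chunks of size k+1
def pvChunks (l : List String) (k : Nat) : List (List String) :=
  match l with
  | [] => []
  | t :: ts => (t :: ts.take k) :: pvChunks (ts.drop k) k
termination_by l.length
decreasing_by simp

-- concatenation of ", " ++ t pieces (proof-side only)
def pvCommaCat : List String → String
  | [] => ""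
  | t :: ts => ", " ++ t ++ pvCommaCat ts

theorem pvJoin_comma (c : List String) : ∀ (t : String),
    PySem.Str.join ", " (t :: c) = t ++ pvCommaCat c := by
  induction c with
  | nil =>
    intro t
    apply pvStrExt
    simp [PySem.Str.toList_join, PySem.Chars.join_singleton, pvCommaCat]
  | cons u us ih =>
    intro t
    apply pvStrExt
    have h := congrArg String.toList (ih u)
    simp [PySem.Str.toList_join, PySem.Chars.join_cons_cons, pvCommaCat] at h ⊢
    simp [h]

theorem pvJoin_cons_cons (x y : String) (r : List String) :
    PySem.Str.join ", &\n  " (x :: y :: r) = x ++ ", &\n  " ++ PySem.Str.join ", &\n  " (y :: r) := by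
  apply pvStrExt
  simp [PySem.Str.toList_join, PySem.Chars.join_cons_cons]

theorem pvJoin_single (x : String) :
    PySem.Str.join ", &\n  " [x] = x := by
  apply pvStrExt
  simp [PySem.Str.toList_join, PySem.Chars.join_singleton]

-- A's range/slice chunk list equals pvChunks
theorem pvA_chunks (nb : Int) (hnb : 1 ≤ nb) :
    ∀ (N : Nat) (l : List String), l.length ≤ N →
    (PySem.List.pyRange 0 (l.length : Int) nb).map
        (fun i => (l.drop i.toNat).take nb.toNat)
      = pvChunks l (nb.toNat - 1) := by
  intro N
  induction N with
  | zero =>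
    intro l hl
    have hnil : l = [] := by cases l with
      | nil => rfl
      | cons t ts => simp at hl
    subst hnil
    rw [pvPyRange_pos_nil _ _ _ (by omega) (by simp)]
    simp [pvChunks]
  | succ N ih =>
    intro l hl
    cases l with
    | nil =>
      rw [pvPyRange_pos_nil _ _ _ (by omega) (by simp)]
      simp [pvChunks]
    | cons t ts =>
      rw [pvPyRange_pos_cons _ _ _ (by omega) (by simp)]
      rw [pvChunks]
      simp only [List.map_cons]
      have hnbk : nb.toNat = (nb.toNat - 1) + 1 := by omega
      congr 1
      · show ((t :: ts).drop (0:Int).toNat).take nb.toNat = t :: ts.take (nb.toNat - 1)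
        rw [hnbk]
        simp [List.take_succ_cons]
      · have hshift : PySem.List.pyRange (0 + nb) ((((t :: ts).length : Int) - nb) + nb) nb
            = (PySem.List.pyRange 0 (((t :: ts).length : Int) - nb) nb).map (· + nb) :=
          pvPyRange_shift _ _ _ _ (by omega)
        rw [show (((t :: ts).length : Int) - nb) + nb = ((t :: ts).length : Int) by ring] at hshift
        rw [hshift, List.map_map]
        by_cases hbig : nb ≤ ((t :: ts).length : Int)
        · have hklen : nb.toNat - 1 ≤ ts.length := by simp at hbig; omega
          have hlen' : (((ts.drop (nb.toNat - 1)).length : Int)) = ((t :: ts).length : Int) - nb := by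
            simp [List.length_drop]; omega
          rw [← hlen']
          rw [← ih (ts.drop (nb.toNat - 1)) (by simp at hl ⊢; omega)]
          apply List.map_congr_left
          intro i hi
          obtain ⟨hi0, _, _⟩ := (PySem.List.mem_pyRange_iff_of_pos (by omega) i).mp hi
          simp [Function.comp]
          rw [show (i + nb).toNat = (nb.toNat - 1 + 1) + i.toNat by omega]
          rw [← List.drop_drop]
          congr 1
          rw [show nb.toNat - 1 + 1 = 1 + (nb.toNat - 1) by omega, ← List.drop_drop]
          simp
        · have hdrop : ts.drop (nb.toNat - 1) = [] := by
            apply List.drop_eq_nil_of_le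
            simp at hbig ⊢
            omega
          rw [pvPyRange_pos_nil _ _ _ (by omega) (by simp at hbig ⊢; omega), hdrop]
          simp [pvChunks]

-- the inner fold over indices that are neither 0 nor chunk starts
theorem pvInner (nb : Int) (c : List String) : ∀ (j : Int) (acc : String),
    (∀ x : Int, j ≤ x → x < j + c.length → x ≠ 0 ∧ ¬ nb ∣ x) →
    (PySem.List.enumerate c j).foldl
        (fun acc jt =>
          if jt.1 = 0 then acc ++ jt.2
          else if PySem.Int.mod jt.1 nb = 0 then acc ++ ", &\n  " ++ jt.2
          else acc ++ ", " ++ jt.2) acc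
      = acc ++ pvCommaCat c := by
  induction c with
  | nil =>
    intro j acc _
    simp only [PySem.List.enumerate_nil, List.foldl_nil]
    apply pvStrExt
    simp [pvCommaCat]
  | cons t ts ih =>
    intro j acc h
    obtain ⟨hj0, hjd⟩ := h j (le_refl j) (by simp)
    rw [PySem.List.enumerate_cons]
    simp only [List.foldl_cons]
    rw [if_neg hj0, if_neg (by
      rw [PySem.Int.mod_eq_zero_iff_dvd]; exact hjd)]
    rw [ih (j+1) _ (by
      intro x hx1 hx2
      exact h x (by omega) (by simp at hx2 ⊢; omega))]
    apply pvStrExt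
    simp [pvCommaCat]

-- the main correspondence: B's flat loop produces A's chunk-joined body
theorem pvMain (nb : Int) (hnb : 1 ≤ nb) :
    ∀ (N : Nat) (l : List String), l.length ≤ N → ∀ (s : Int) (acc : String), 0 ≤ s → nb ∣ s →
    (PySem.List.enumerate l s).foldl
        (fun acc jt =>
          if jt.1 = 0 then acc ++ jt.2
          else if PySem.Int.mod jt.1 nb = 0 then acc ++ ", &\n  " ++ jt.2
          else acc ++ ", " ++ jt.2) acc
      = acc ++ (if l.isEmpty then "" else
          (if s = 0 then "" else ", &\n  ") ++
          PySem.Str.join ", &\n  " ((pvChunks l (nb.toNat - 1)).map (PySem.Str.join ", "))) := by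
  intro N
  induction N with
  | zero =>
    intro l hl s acc _ _
    have hnil : l = [] := by cases l with
      | nil => rfl
      | cons t ts => simp at hl
    subst hnil
    simp only [PySem.List.enumerate_nil, List.foldl_nil, List.isEmpty_nil, if_pos]
    apply pvStrExt; simp
  | succ N ih =>
    intro l hl s acc hs hd
    cases l with
    | nil =>
      simp only [PySem.List.enumerate_nil, List.foldl_nil, List.isEmpty_nil, if_pos]
      apply pvStrExt; simp
    | cons t ts =>
      rw [PySem.List.enumerate_cons]
      simp only [List.foldl_cons]
      have hstep : (if s = (0:Int) then acc ++ t
            else if PySem.Int.mod s nb = 0 then acc ++ ", &\n  " ++ t else acc ++ ", " ++ t)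
          = acc ++ (if s = 0 then "" else ", &\n  ") ++ t := by
        by_cases hs0 : s = 0
        · rw [if_pos hs0, if_pos hs0]
          apply pvStrExt; simp
        · rw [if_neg hs0, if_pos (by rw [PySem.Int.mod_eq_zero_iff_dvd]; exact hd), if_neg hs0]
      rw [hstep]
      set k := nb.toNat - 1 with hk
      have hknb : (k : Int) + 1 = nb := by omega
      rw [show PySem.List.enumerate ts (s+1) = PySem.List.enumerate (ts.take k ++ ts.drop k) (s+1) by
        rw [List.take_append_drop]]
      rw [PySem.List.enumerate_append, List.foldl_append]
      rw [pvInner nb (ts.take k) (s+1) _ (by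
        intro x hx1 hx2
        have htl : (ts.take k).length ≤ k := by
          simpa using List.length_take_le k ts
        constructor
        · omega
        · intro hdvd
          have h1 : nb ∣ (x - s) := dvd_sub hdvd hd
          have h2 : nb ≤ x - s := Int.le_of_dvd (by omega) h1
          omega)]
      rcases hdk : ts.drop k with _ | ⟨u, us⟩
      · simp only [PySem.List.enumerate_nil, List.foldl_nil, List.isEmpty_cons,
          if_neg (by simp : ¬ (false = true))]
        rw [pvChunks, hdk]
        simp only [pvChunks, List.map_cons, List.map_nil]
        rw [pvJoin_single, pvJoin_comma]
        apply pvStrExt; simp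
      · have hklt : k < ts.length := by
          by_contra hc
          rw [List.drop_eq_nil_of_le (by omega)] at hdk
          simp at hdk
        have htk : ((ts.take k).length : Int) = (k : Int) := by
          simp [List.length_take]; omega
        rw [htk]
        have hs' : s + 1 + (k:Int) = s + nb := by omega
        rw [hs']
        have hlenuus : (u :: us).length ≤ N := by
          have := congrArg List.length hdk
          simp at this hl ⊢
          omega
        rw [ih (u :: us) hlenuus (s + nb) _ (by omega) (dvd_add hd (dvd_refl nb))]
        simp only [List.isEmpty_cons, if_neg (by simp : ¬ (false = true)),
          if_neg (show ¬ s + nb = 0 by omega)]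
        have e1 : pvChunks (t :: ts) k = (t :: ts.take k) :: pvChunks (u :: us) k := by
          rw [pvChunks, hdk]
        rw [e1]
        have e2 : pvChunks (u :: us) k = (u :: us.take k) :: pvChunks (us.drop k) k := by
          rw [pvChunks]
        rw [e2]
        simp only [List.map_cons]
        rw [pvJoin_cons_cons, pvJoin_comma (ts.take k) t]
        apply pvStrExt
        simp

-- ===== VERDICT (by name: the statement is the Claim_ definition above) =====
theorem to_f90_arrayconstructer_spec : Claim_equal_to_f90_arrayconstructer := by
  intro vardef var table nb _ hnbP
  have hnb : (1:Int) ≤ nb := hnbP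
  show to_f90_arrayconstructer vardef var table nb = to_f90_arrayconstructer_alt vardef var table nb
  simp only [to_f90_arrayconstructer, to_f90_arrayconstructer_alt]
  cases table with
  | nil =>
    rw [PySem.List.slice_from_one]
    simp only [List.tail_nil, PySem.List.enumerate_nil, List.foldl_nil]
    rw [show ((List.length ([] : List String) : Int)) = 0 by simp]
    rw [pvPyRange_pos_nil _ _ _ (by omega) (by omega)]
    apply pvStrExt
    simp [PySem.Str.toList_join, PySem.Chars.join_nil]
  | cons t0 l =>
    rw [PySem.List.slice_from_one]
    simp only [List.tail_cons]
    have hA : (PySem.List.pyRange 1 (((t0 :: l).length : Int)) nb).map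
          (fun i => PySem.Str.join ", " ((PySem.List.slice (t0 :: l) (some i) (some (i + nb))).map (fun t => t)))
        = (pvChunks l (nb.toNat - 1)).map (PySem.Str.join ", ") := by
      have h1 : PySem.List.pyRange 1 (((t0 :: l).length : Int)) nb
          = (PySem.List.pyRange 0 ((l.length : Int)) nb).map (· + 1) := by
        have h := pvPyRange_shift 0 (l.length : Int) 1 nb (by omega)
        rw [show ((t0 :: l).length : Int) = (l.length : Int) + 1 by simp]
        simpa using h
      rw [h1, List.map_map]
      rw [← pvA_chunks nb hnb l.length l (le_refl _), List.map_map]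
      apply List.map_congr_left
      intro i hi
      obtain ⟨hi0, _, _⟩ := (PySem.List.mem_pyRange_iff_of_pos (by omega) i).mp hi
      simp only [Function.comp]
      congr 1
      rw [PySem.List.slice_toNat (t0 :: l) (by omega) (by omega)]
      rw [show (i + 1 + nb).toNat - (i + 1).toNat = nb.toNat by omega,
          show (i + 1).toNat = i.toNat + 1 by omega]
      rw [List.drop_succ_cons]
      simp
    rw [hA]
    rw [pvMain nb hnb l.length l (le_refl _) 0 _ (le_refl 0) (dvd_zero nb)]
    simp only [if_pos rfl]
    cases l with
    | nil =>
      simp only [List.isEmpty_nil, if_pos, pvChunks, List.map_nil]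
      apply pvStrExt
      simp [PySem.Str.toList_join, PySem.Chars.join_nil]
    | cons u us =>
      simp only [List.isEmpty_cons, if_neg (by simp : ¬ (false = true))]
      apply pvStrExt
      simp
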